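-- pv_equiv track=rewrite | github.com/ErickaT11/TALLERES | Hermite.py | agregar
-- ===== SOURCE A (Python) =====
-- def agregar(x,punto):
--
--     if x == 0:
--         string = ""
--         return string
--     if x % 2 == 1 :
--         string = "*(x-"+str(punto[((x+1)//2)-1])+")"
--         return string + agregar(x-1,punto)
--     else :
--         string = "*((x-"+str(punto[((x+1)//2)-1])+")**2)"
--         return string + agregar(x-2,punto)
-- ===== SOURCE B (Python) =====
-- def agregar(x, punto):
--     # Iterative accumulator version: peel the odd term once, then emit the
--     # squared terms by direct index countdown instead of recursion.
--     result = ""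
--     if x % 2 == 1:
--         result += "*(x-" + str(punto[((x + 1) // 2) - 1]) + ")"
--         x -= 1
--     for i in range(x // 2 - 1, -1, -1):
--         result += "*((x-" + str(punto[i]) + ")**2)"
--     return result
-- ===== Notes on version B (the rewrite author's own statement) =====
-- stated objective: simpler
-- what changed: Replaced the recursion with an iterative accumulator: the odd term is peeled off once, then the squared terms are emitted by a direct index countdown loop range(x//2-1,-1,-1), so no call stack and no repeated index arithmetic from x.
import Mathlib
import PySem

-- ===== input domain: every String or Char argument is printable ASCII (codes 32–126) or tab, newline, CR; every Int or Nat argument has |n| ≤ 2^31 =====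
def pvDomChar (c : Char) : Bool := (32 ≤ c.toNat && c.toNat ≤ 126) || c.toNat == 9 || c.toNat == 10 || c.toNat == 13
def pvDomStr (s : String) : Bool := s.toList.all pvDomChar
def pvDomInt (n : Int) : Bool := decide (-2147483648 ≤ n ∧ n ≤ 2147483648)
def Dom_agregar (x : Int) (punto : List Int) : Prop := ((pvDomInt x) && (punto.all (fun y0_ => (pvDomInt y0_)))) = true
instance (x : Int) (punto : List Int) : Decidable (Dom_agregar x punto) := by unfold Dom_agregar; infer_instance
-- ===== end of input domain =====

-- B replaces A's recursion by an iterative accumulator loop (return value only; no speed claim).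

-- ===== PORT A =====
-- literal transliteration of the recursion; fuel = x.toNat makes it total (enough for every x ≥ 0,
-- where the Python recursion terminates); punto[i] via pyGetD (Pre_ keeps the index in range)
def agregarFuel : Nat → Int → List Int → String
  | 0, _, _ => ""
  | n + 1, x, punto =>
    if x = 0 then ""
    else if PySem.Int.mod x 2 = 1 then
      "*(x-" ++ PySem.Int.toStr (PySem.List.pyGetD punto (PySem.Int.floordiv (x + 1) 2 - 1) 0) ++ ")"
        ++ agregarFuel n (x - 1) punto
    else
      "*((x-" ++ PySem.Int.toStr (PySem.List.pyGetD punto (PySem.Int.floordiv (x + 1) 2 - 1) 0) ++ ")**2)"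
        ++ agregarFuel n (x - 2) punto

def agregar (x : Int) (punto : List Int) : String := agregarFuel x.toNat x punto

-- ===== PORT B =====
def agregar_alt (x : Int) (punto : List Int) : String :=
  let (result, y) :=
    if PySem.Int.mod x 2 = 1 then
      ("" ++ ("*(x-" ++ PySem.Int.toStr (PySem.List.pyGetD punto (PySem.Int.floordiv (x + 1) 2 - 1) 0) ++ ")"), x - 1)
    else ("", x)
  (PySem.List.pyRange (PySem.Int.floordiv y 2 - 1) (-1) (-1)).foldl
    (fun acc i => acc ++ ("*((x-" ++ PySem.Int.toStr (PySem.List.pyGetD punto i 0) ++ ")**2)")) result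

-- ===== PRECONDITION & SPEC =====
-- Pre_ excludes exactly the inputs on which the Python A raises: x < 0 (unbounded recursion ending in
-- IndexError/RecursionError) and lists shorter than (x+1)//2 (IndexError).
def Pre_agregar (x : Int) (punto : List Int) : Prop :=
  0 ≤ x ∧ PySem.Int.floordiv (x + 1) 2 ≤ (punto.length : Int)
instance (x : Int) (punto : List Int) : Decidable (Pre_agregar x punto) := by unfold Pre_agregar; infer_instance
def pvWitness_agregar : Int × List Int := (5, [1, 2, 3])

def Spec_agregar (x : Int) (punto : List Int) (out : String) : Prop := out = agregar_alt x punto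
instance (x : Int) (punto : List Int) (out : String) : Decidable (Spec_agregar x punto out) := by unfold Spec_agregar; infer_instance

-- ===== CLAIM (what is proved, stated in full; the proofs are below) =====
def Claim_equal_agregar : Prop := ∀ (x : Int) (punto : List Int), Dom_agregar x punto → Pre_agregar x punto → Spec_agregar x punto (agregar x punto)

-- ===== LEMMAS AND PROOFS =====

-- the even-part loop of B, starting from an arbitrary accumulator
def evenLoop (punto : List Int) (y : Int) (acc : String) : String :=
  (PySem.List.pyRange (PySem.Int.floordiv y 2 - 1) (-1) (-1)).foldl
    (fun acc i => acc ++ ("*((x-" ++ PySem.Int.toStr (PySem.List.pyGetD punto i 0) ++ ")**2)")) acc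

lemma foldl_str_acc (f : Int → String) (l : List Int) (s : String) :
    l.foldl (fun acc i => acc ++ f i) s = s ++ l.foldl (fun acc i => acc ++ f i) "" := by
  induction l generalizing s with
  | nil => simp
  | cons a t ih =>
    simp only [List.foldl_cons]
    rw [ih (s ++ f a), ih ("" ++ f a)]
    simp [String.append_assoc]

lemma evenLoop_acc (punto : List Int) (y : Int) (acc : String) :
    evenLoop punto y acc = acc ++ evenLoop punto y "" := by
  unfold evenLoop; exact foldl_str_acc _ _ acc

lemma mod_two_eq_one_iff (x : Int) : PySem.Int.mod x 2 = 1 ↔ x % 2 = 1 := by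
  rw [PySem.Int.mod_eq_emod_of_pos (by norm_num)]

lemma floordiv_two (x : Int) : PySem.Int.floordiv x 2 = x / 2 :=
  PySem.Int.floordiv_eq_ediv_of_pos (by norm_num)

-- main induction: with enough fuel, A's recursion equals B's value
lemma agregarFuel_eq_alt (punto : List Int) :
    ∀ (n : Nat) (x : Int), 0 ≤ x → x ≤ (n : Int) →
      agregarFuel n x punto = agregar_alt x punto := by
  intro n
  induction n with
  | zero =>
    intro x h0 hn
    have hx : x = 0 := le_antisymm (by exact_mod_cast hn) h0
    subst hx
    simp [agregarFuel, agregar_alt, PySem.Int.mod,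
          PySem.List.pyRange_neg_one_eq_nil (by norm_num : (-1 : Int) ≤ -1)]
  | succ n ih =>
    intro x h0 hn
    by_cases hx0 : x = 0
    · subst hx0
      simp [agregarFuel, agregar_alt, PySem.Int.mod,
            PySem.List.pyRange_neg_one_eq_nil (by norm_num : (-1 : Int) ≤ -1)]
    · by_cases hodd : PySem.Int.mod x 2 = 1
      · -- x odd, x ≥ 1
        have hodd' : x % 2 = 1 := (mod_two_eq_one_iff x).1 hodd
        have h1 : (1 : Int) ≤ x := by omega
        -- A side
        have hA : agregarFuel (n + 1) x punto =
            "*(x-" ++ PySem.Int.toStr (PySem.List.pyGetD punto (PySem.Int.floordiv (x + 1) 2 - 1) 0) ++ ")"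
              ++ agregarFuel n (x - 1) punto := by
          simp [agregarFuel, hx0, hodd']
        have hxm1even : (x - 1) % 2 ≠ 1 := by omega
        have hIH := ih (x - 1) (by omega) (by push_cast at hn ⊢; omega)
        -- B side at x - 1 is just the even loop
        have hBalt : agregar_alt (x - 1) punto = evenLoop punto (x - 1) "" := by
          simp [agregar_alt, evenLoop, hxm1even]
        -- B side at x
        have hB : agregar_alt x punto =
            ("" ++ ("*(x-" ++ PySem.Int.toStr (PySem.List.pyGetD punto (PySem.Int.floordiv (x + 1) 2 - 1) 0) ++ ")"))
              ++ evenLoop punto (x - 1) "" := by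
          simp only [agregar_alt, hodd, if_pos]
          exact evenLoop_acc punto (x - 1) _
        rw [hA, hIH, hBalt, hB]
        simp [String.append_assoc]
      · -- x even, x ≥ 2
        have hodd' : x % 2 ≠ 1 := fun h => hodd ((mod_two_eq_one_iff x).2 h)
        have h2 : (2 : Int) ≤ x := by omega
        have hA : agregarFuel (n + 1) x punto =
            "*((x-" ++ PySem.Int.toStr (PySem.List.pyGetD punto (PySem.Int.floordiv (x + 1) 2 - 1) 0) ++ ")**2)"
              ++ agregarFuel n (x - 2) punto := by
          simp [agregarFuel, hx0, hodd']
        have hxm2even : (x - 2) % 2 ≠ 1 := by omega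
        have hIH := ih (x - 2) (by omega) (by push_cast at hn ⊢; omega)
        have hBalt : agregar_alt (x - 2) punto = evenLoop punto (x - 2) "" := by
          simp [agregar_alt, evenLoop, hodd']
        -- B at x: unfold one step of the countdown range
        have hidx : PySem.Int.floordiv (x + 1) 2 - 1 = PySem.Int.floordiv x 2 - 1 := by
          rw [floordiv_two, floordiv_two]; omega
        have hcons : PySem.List.pyRange (PySem.Int.floordiv x 2 - 1) (-1) (-1)
            = (PySem.Int.floordiv x 2 - 1) :: PySem.List.pyRange (PySem.Int.floordiv x 2 - 2) (-1) (-1) := by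
          have := PySem.List.pyRange_neg_one_cons (a := PySem.Int.floordiv x 2 - 1) (b := -1)
            (by rw [floordiv_two]; omega)
          simpa [sub_sub] using this
        have hstep : PySem.Int.floordiv (x - 2) 2 - 1 = PySem.Int.floordiv x 2 - 2 := by
          rw [floordiv_two, floordiv_two]; omega
        have hB : agregar_alt x punto = evenLoop punto x "" := by
          simp [agregar_alt, evenLoop, hodd']
        rw [hA, hIH, hBalt, hB]
        unfold evenLoop
        rw [hcons]
        simp only [List.foldl_cons]
        rw [hstep, hidx]
        exact (foldl_str_acc _ _ _).symm
  
-- ===== VERDICT (by name: the statement is the Claim_ definition above) =====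
theorem agregar_spec : Claim_equal_agregar := by
  intro x punto _ hpre
  unfold Spec_agregar agregar
  exact agregarFuel_eq_alt punto x.toNat x hpre.1 (by omega)
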